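-- pv_equiv track=rewrite | github.com/Garcia-G-G/english-ai-automate-videos | src/video/fill_blank.py | _find_blank
-- ===== SOURCE A (Python) =====
-- from typing import Dict, Optional, Tuple
--
-- def _find_blank(sentence: str) -> Optional[Tuple[str, str]]:
--     """Split sentence at blank marker. Returns (prefix, suffix) or None."""
--     if '___' in sentence:
--         i = sentence.index('___')
--         return sentence[:i], sentence[i + 3:]
--     if '_' in sentence:
--         i = sentence.index('_')
--         end = i
--         while end < len(sentence) and sentence[end] == '_':
--             end += 1
--         return sentence[:i], sentence[end:]
--     return None
-- ===== SOURCE B (Python) =====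
-- def _find_blank(sentence):
--     """Split sentence at blank marker. Returns (prefix, suffix) or None.
--
--     Single left-to-right scan: records the start of the first underscore run
--     reaching length >= 3, and the start/end of the very first underscore run,
--     then branches once at the end.
--     """
--     triple_start = None   # start of first underscore run reaching length >= 3
--     first_start = None    # start of first underscore run
--     first_end = None      # end (exclusive) of first underscore run, once closed
--     run_start = None      # start of the current underscore run
--     for i, ch in enumerate(sentence):
--         if ch == '_':
--             if run_start is None:
--                 run_start = i
--             if triple_start is None and i + 1 >= run_start + 3:
--                 triple_start = run_start
--             if first_start is None:
--                 first_start = i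
--         else:
--             if first_start is not None and first_end is None:
--                 first_end = i
--             run_start = None
--     if triple_start is not None:
--         return sentence[:triple_start], sentence[triple_start + 3:]
--     if first_start is not None:
--         end = first_end if first_end is not None else len(sentence)
--         return sentence[:first_start], sentence[end:]
--     return None
-- ===== Notes on version B (the rewrite author's own statement) =====
-- stated objective: alternative
-- what changed: Replaces A's repeated substring membership tests, index() re-scans and a trailing while loop with one left-to-right scan that records the first underscore run reaching length >= 3 and the boundaries of the very first run, followed by a single final branch.
import Mathlib
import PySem

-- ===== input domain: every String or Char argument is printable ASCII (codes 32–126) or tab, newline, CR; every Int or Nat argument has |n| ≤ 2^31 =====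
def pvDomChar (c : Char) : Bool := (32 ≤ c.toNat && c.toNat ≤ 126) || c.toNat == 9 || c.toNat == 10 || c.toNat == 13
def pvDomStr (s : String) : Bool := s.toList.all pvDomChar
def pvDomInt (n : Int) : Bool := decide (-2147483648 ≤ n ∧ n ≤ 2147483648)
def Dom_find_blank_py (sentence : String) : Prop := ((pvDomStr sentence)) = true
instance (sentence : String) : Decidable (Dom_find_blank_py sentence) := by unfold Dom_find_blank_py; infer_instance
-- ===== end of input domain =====

-- B replaces A's substring searches and re-scans by ONE left-to-right scan collecting run
-- information before a single final branch ('alternative': same O(n) cost, different structure).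

-- ===== PORT A =====
-- the 'while end < len(sentence) and sentence[end] == "_"' loop of A
def pyWhileEnd (s : List Char) (e : Nat) : Nat :=
  if e < s.length ∧ PySem.List.pyGet? s (e : Int) = some '_' then pyWhileEnd s (e + 1) else e
termination_by s.length - e

-- literal transliteration of A; sentence.index(sub) equals Str.find here because both
-- calls are guarded by the corresponding 'in' test, so .index never raises
def find_blank_py (sentence : String) : Option (String × String) :=
  if PySem.Str.isIn "___" sentence then
    let i : Int := PySem.Str.find sentence "___"
    some (PySem.Str.slice sentence none (some i), PySem.Str.slice sentence (some (i + 3)) none)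
  else if PySem.Str.isIn "_" sentence then
    let i : Int := PySem.Str.find sentence "_"
    let e : Nat := pyWhileEnd sentence.toList i.toNat
    some (PySem.Str.slice sentence none (some i), PySem.Str.slice sentence (some (e : Int)) none)
  else
    none

-- ===== PORT B =====
-- the for-loop of B: state (triple_start, first_start, first_end, run_start), index i
def scanLoop : List Char → Nat → Option Nat → Option Nat → Option Nat → Option Nat →
    Option Nat × Option Nat × Option Nat
  | [], _, ts, fs, fe, _ => (ts, fs, fe)
  | c :: rest, i, ts, fs, fe, rs =>
    if c = '_' then
      let rs' : Nat := match rs with | none => i | some r => r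
      let ts' : Option Nat := if ts = none ∧ rs' + 3 ≤ i + 1 then some rs' else ts
      let fs' : Option Nat := if fs = none then some i else fs
      scanLoop rest (i + 1) ts' fs' fe (some rs')
    else
      let fe' : Option Nat := if fs ≠ none ∧ fe = none then some i else fe
      scanLoop rest (i + 1) ts fs fe' none

def find_blank_py_alt (sentence : String) : Option (String × String) :=
  let s := sentence.toList
  match scanLoop s 0 none none none none with
  | (some t, _, _) =>
      some (PySem.Str.slice sentence none (some (t : Int)),
            PySem.Str.slice sentence (some ((t : Int) + 3)) none)
  | (none, some f, fe) =>
      let e : Nat := match fe with | some e => e | none => s.length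
      some (PySem.Str.slice sentence none (some (f : Int)),
            PySem.Str.slice sentence (some (e : Int)) none)
  | (none, none, _) => none

-- ===== PRECONDITION & SPEC =====
def Spec_find_blank_py (sentence : String) (out : Option (String × String)) : Prop := out = find_blank_py_alt sentence
instance (sentence : String) (out : Option (String × String)) : Decidable (Spec_find_blank_py sentence out) := by unfold Spec_find_blank_py; infer_instance

-- ===== CLAIM (what is proved, stated in full; the proofs are below) =====
def Claim_equal_find_blank_py : Prop := ∀ (sentence : String), Dom_find_blank_py sentence → Spec_find_blank_py sentence (find_blank_py sentence)

-- ===== LEMMAS AND PROOFS =====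

-- "a triple of underscores starts at j" / "an underscore sits at j"
def P3 (s : List Char) (j : Nat) : Prop :=
  s[j]? = some '_' ∧ s[j + 1]? = some '_' ∧ s[j + 2]? = some '_'
def P1 (s : List Char) (j : Nat) : Prop := s[j]? = some '_'

def InvTs (s : List Char) : Option Nat → Prop
  | some t => P3 s t ∧ ∀ j < t, ¬ P3 s j
  | none => ∀ j, ¬ P3 s j

def InvFs (s : List Char) : Option Nat → Prop
  | some f => P1 s f ∧ ∀ j < f, ¬ P1 s j
  | none => ∀ j, ¬ P1 s j

def InvFe (s : List Char) : Option Nat → Option Nat → Prop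
  | some f, some e => f < e ∧ (∀ j, f ≤ j → j < e → s[j]? = some '_') ∧
      ∃ d, s[e]? = some d ∧ d ≠ '_'
  | some f, none => ∀ j, f ≤ j → j < s.length → s[j]? = some '_'
  | none, some _ => False
  | none, none => True

def InvRs (s : List Char) : Option Nat → Prop
  | some r => r < s.length ∧ (∀ j, r ≤ j → j < s.length → s[j]? = some '_') ∧
      (r = 0 ∨ ¬ s[r - 1]? = some '_')
  | none => ¬ s[s.length - 1]? = some '_'

lemma lt_len {p : List Char} {j : Nat} {d : Char} (h : p[j]? = some d) : j < p.length := by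
  by_contra hc
  rw [List.getElem?_eq_none (by omega)] at h
  simp at h

lemma getElem?_concat (p : List Char) (c : Char) (j : Nat) :
    (p ++ [c])[j]? = if j < p.length then p[j]? else if j = p.length then some c else none := by
  rcases lt_trichotomy j p.length with h | h | h
  · simp [List.getElem?_append_left h, h]
  · subst h; simp
  · rw [if_neg (by omega), if_neg (by omega)]
    refine List.getElem?_eq_none ?_
    simp; omega

lemma P3_concat_lo {p : List Char} {c : Char} {j : Nat} (h : j + 2 < p.length) :
    P3 (p ++ [c]) j ↔ P3 p j := by
  unfold P3
  rw [getElem?_concat, getElem?_concat, getElem?_concat,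
    if_pos (by omega), if_pos (by omega), if_pos (by omega)]

lemma P1_concat_lo {p : List Char} {c : Char} {j : Nat} (h : j < p.length) :
    P1 (p ++ [c]) j ↔ P1 p j := by
  unfold P1
  rw [getElem?_concat, if_pos (by omega)]

-- underscore step: the current-run tracker stays valid
lemma stepU_rs (p : List Char) (r' : Nat)
    (hr' : InvRs p (some r') ∨ (r' = p.length ∧ InvRs p none)) :
    InvRs (p ++ ['_']) (some r') := by
  unfold InvRs
  rcases hr' with ⟨hlt, hrun, hbd⟩ | ⟨rfl, hnone⟩
  · refine ⟨by simp; omega, ?_, ?_⟩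
    · intro j hj hjlt
      rw [getElem?_concat]
      simp only [List.length_append, List.length_cons, List.length_nil] at hjlt
      by_cases hcase : j < p.length
      · rw [if_pos hcase]; exact hrun j hj hcase
      · rw [if_neg hcase, if_pos (by omega)]
    · rcases hbd with h0 | hne
      · exact Or.inl h0
      · refine Or.inr ?_
        rw [getElem?_concat, if_pos (by omega)]
        exact hne
  · refine ⟨by simp, ?_, ?_⟩
    · intro j hj hjlt
      simp only [List.length_append, List.length_cons, List.length_nil] at hjlt
      have : j = p.length := by omega
      subst this
      rw [getElem?_concat, if_neg (by omega), if_pos rfl]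
    · unfold InvRs at hnone
      by_cases h0 : p.length = 0
      · exact Or.inl h0
      · refine Or.inr ?_
        rw [getElem?_concat, if_pos (by omega)]
        exact hnone

-- underscore step: first-underscore tracker
lemma stepU_fs (p : List Char) (fs : Option Nat) (hfs : InvFs p fs) :
    InvFs (p ++ ['_']) (if fs = none then some p.length else fs) := by
  rcases fs with _ | f
  · simp only [reduceIte]
    unfold InvFs at hfs ⊢
    constructor
    · unfold P1; rw [getElem?_concat, if_neg (by omega), if_pos rfl]
    · intro j hj
      rw [P1_concat_lo hj]
      exact hfs j
  · simp only [reduceCtorEq, ite_false]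
    unfold InvFs at hfs ⊢
    obtain ⟨hP, hmin⟩ := hfs
    have hf : f < p.length := lt_len hP
    refine ⟨(P1_concat_lo hf).mpr hP, ?_⟩
    intro j hj
    rw [P1_concat_lo (by omega)]
    exact hmin j hj

-- underscore step: first-run-end tracker (unchanged; run may extend)
lemma stepU_fe (p : List Char) (fs fe : Option Nat) (hfe : InvFe p fs fe) :
    InvFe (p ++ ['_']) (if fs = none then some p.length else fs) fe := by
  rcases fs with _ | f <;> rcases fe with _ | e
  · simp only [reduceIte]
    unfold InvFe
    intro j hj hjlt
    simp only [List.length_append, List.length_cons, List.length_nil] at hjlt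
    have : j = p.length := by omega
    subst this
    rw [getElem?_concat, if_neg (by omega), if_pos rfl]
  · exact absurd hfe id
  · simp only [reduceCtorEq, ite_false]
    unfold InvFe at hfe ⊢
    intro j hj hjlt
    simp only [List.length_append, List.length_cons, List.length_nil] at hjlt
    rw [getElem?_concat]
    by_cases hcase : j < p.length
    · rw [if_pos hcase]; exact hfe j hj hcase
    · rw [if_neg hcase, if_pos (by omega)]
  · simp only [reduceCtorEq, ite_false]
    unfold InvFe at hfe ⊢
    obtain ⟨hlt, hrun, d, hd, hdne⟩ := hfe
    have he : e < p.length := lt_len hd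
    refine ⟨hlt, ?_, d, ?_, hdne⟩
    · intro j hj hjlt
      rw [getElem?_concat, if_pos (by omega)]
      exact hrun j hj hjlt
    · rw [getElem?_concat, if_pos he]
      exact hd

-- underscore step: triple tracker
lemma stepU_ts (p : List Char) (ts : Option Nat) (r' : Nat)
    (hts : InvTs p ts)
    (hr' : InvRs p (some r') ∨ (r' = p.length ∧ InvRs p none)) :
    InvTs (p ++ ['_']) (if ts = none ∧ r' + 3 ≤ p.length + 1 then some r' else ts) := by
  rcases ts with _ | t
  · by_cases hcond : r' + 3 ≤ p.length + 1
    · simp only [hcond, and_true, reduceIte]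
      unfold InvTs at hts ⊢
      rcases hr' with ⟨hlt, hrun, _⟩ | ⟨rfl, _⟩
      · constructor
        · refine ⟨?_, ?_, ?_⟩
          · rw [getElem?_concat, if_pos (by omega)]
            exact hrun r' (by omega) (by omega)
          · rw [getElem?_concat, if_pos (by omega)]
            exact hrun (r' + 1) (by omega) (by omega)
          · rw [getElem?_concat]
            by_cases hcase : r' + 2 < p.length
            · rw [if_pos hcase]; exact hrun (r' + 2) (by omega) hcase
            · rw [if_neg hcase, if_pos (by omega)]
        · intro j hj
          rw [P3_concat_lo (by omega)]
          exact hts j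
      · omega
    · rw [if_neg (by tauto)]
      unfold InvTs at hts ⊢
      intro j hP3
      obtain ⟨h1, h2, h3⟩ := hP3
      rcases lt_trichotomy (j + 2) p.length with hcase | hcase | hcase
      · exact hts j ⟨by rw [getElem?_concat, if_pos (by omega)] at h1; exact h1,
          by rw [getElem?_concat, if_pos (by omega)] at h2; exact h2,
          by rw [getElem?_concat, if_pos hcase] at h3; exact h3⟩
      · -- a new triple would end at the appended char: the run must already be long
        rw [getElem?_concat, if_pos (by omega)] at h1
        rw [getElem?_concat, if_pos (by omega)] at h2
        -- p[j]? = '_' and p[j+1]? = '_' with j + 2 = p.length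
        rcases hr' with ⟨hlt, hrun, hbd⟩ | ⟨rfl, hnone⟩
        · -- r' is the start of the run ending p; p[j+1] = p[p.length-1] underscore
          have hr2 : r' ≤ j := by
            by_contra hgt
            rcases hbd with h0 | hne
            · omega
            · -- r' = j + 1 or r' = j + 2(> length impossible); then p[r'-1] = p[j] or p[j+1] is '_'
              have : r' - 1 = j ∨ r' - 1 = j + 1 := by omega
              rcases this with hh | hh <;> rw [hh] at hne <;> exact hne (by assumption)
          omega
        · unfold InvRs at hnone
          exact hnone (by rw [show p.length - 1 = j + 1 by omega]; exact h2)
      · rw [getElem?_concat, if_neg (by omega), if_neg (by omega)] at h3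
        simp at h3
  · rw [if_neg (by simp)]
    unfold InvTs at hts ⊢
    obtain ⟨hP, hmin⟩ := hts
    have ht2 : t + 2 < p.length := lt_len hP.2.2
    refine ⟨(P3_concat_lo ht2).mpr hP, ?_⟩
    intro j hj
    rw [P3_concat_lo (by omega)]
    exact hmin j hj

-- non-underscore step lemmas
lemma stepN_rs (p : List Char) (c : Char) (hc : c ≠ '_') : InvRs (p ++ [c]) none := by
  unfold InvRs
  rw [show (p ++ [c]).length - 1 = p.length by simp]
  rw [getElem?_concat, if_neg (by omega), if_pos rfl]
  simp [hc]

lemma stepN_fs (p : List Char) (c : Char) (hc : c ≠ '_') (fs : Option Nat)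
    (hfs : InvFs p fs) : InvFs (p ++ [c]) fs := by
  rcases fs with _ | f
  · unfold InvFs at hfs ⊢
    intro j hP
    unfold P1 at hP
    rw [getElem?_concat] at hP
    by_cases hcase : j < p.length
    · rw [if_pos hcase] at hP; exact hfs j hP
    · by_cases hcase2 : j = p.length
      · rw [if_neg hcase, if_pos hcase2] at hP
        exact hc (Option.some.inj hP)
      · rw [if_neg hcase, if_neg hcase2] at hP; simp at hP
  · unfold InvFs at hfs ⊢
    obtain ⟨hP, hmin⟩ := hfs
    have hf : f < p.length := lt_len hP
    refine ⟨(P1_concat_lo hf).mpr hP, ?_⟩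
    intro j hj
    rw [P1_concat_lo (by omega)]
    exact hmin j hj

lemma stepN_ts (p : List Char) (c : Char) (hc : c ≠ '_') (ts : Option Nat)
    (hts : InvTs p ts) : InvTs (p ++ [c]) ts := by
  rcases ts with _ | t
  · unfold InvTs at hts ⊢
    intro j hP
    obtain ⟨h1, h2, h3⟩ := hP
    rcases lt_trichotomy (j + 2) p.length with hcase | hcase | hcase
    · exact hts j ⟨by rw [getElem?_concat, if_pos (by omega)] at h1; exact h1,
        by rw [getElem?_concat, if_pos (by omega)] at h2; exact h2,
        by rw [getElem?_concat, if_pos hcase] at h3; exact h3⟩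
    · rw [getElem?_concat, if_neg (by omega), if_pos hcase] at h3
      exact hc (Option.some.inj h3)
    · rw [getElem?_concat, if_neg (by omega), if_neg (by omega)] at h3
      simp at h3
  · unfold InvTs at hts ⊢
    obtain ⟨hP, hmin⟩ := hts
    have ht2 : t + 2 < p.length := lt_len hP.2.2
    refine ⟨(P3_concat_lo ht2).mpr hP, ?_⟩
    intro j hj
    rw [P3_concat_lo (by omega)]
    exact hmin j hj

lemma stepN_fe (p : List Char) (c : Char) (hc : c ≠ '_') (fs fe : Option Nat)
    (hfs : InvFs p fs) (hfe : InvFe p fs fe) :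
    InvFe (p ++ [c]) fs (if fs ≠ none ∧ fe = none then some p.length else fe) := by
  rcases fs with _ | f <;> rcases fe with _ | e
  · simp only [ne_eq, not_true_eq_false, false_and, if_neg, not_false_eq_true]
    trivial
  · exact absurd hfe id
  · simp only [ne_eq, reduceCtorEq, not_false_eq_true, and_true, if_pos]
    unfold InvFs at hfs
    unfold InvFe at hfe ⊢
    have hf : f < p.length := lt_len hfs.1
    refine ⟨hf, ?_, c, ?_, hc⟩
    · intro j hj hjlt
      rw [getElem?_concat, if_pos (by omega)]
      exact hfe j hj hjlt
    · rw [getElem?_concat, if_neg (by omega), if_pos rfl]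
  · simp only [ne_eq, reduceCtorEq, and_false, if_neg, not_false_eq_true]
    unfold InvFe at hfe ⊢
    obtain ⟨hlt, hrun, d, hd, hdne⟩ := hfe
    have he : e < p.length := lt_len hd
    refine ⟨hlt, ?_, d, ?_, hdne⟩
    · intro j hj hjlt
      rw [getElem?_concat, if_pos (by omega)]
      exact hrun j hj hjlt
    · rw [getElem?_concat, if_pos he]
      exact hd

lemma scan_correct (rest : List Char) : ∀ (p : List Char) (ts fs fe rs : Option Nat),
    InvTs p ts → InvFs p fs → InvFe p fs fe → InvRs p rs →
    InvTs (p ++ rest) (scanLoop rest p.length ts fs fe rs).1 ∧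
    InvFs (p ++ rest) (scanLoop rest p.length ts fs fe rs).2.1 ∧
    InvFe (p ++ rest) (scanLoop rest p.length ts fs fe rs).2.1
      (scanLoop rest p.length ts fs fe rs).2.2 := by
  induction rest with
  | nil =>
    intro p ts fs fe rs hts hfs hfe hrs
    simpa [scanLoop] using ⟨hts, hfs, hfe⟩
  | cons c rest ih =>
    intro p ts fs fe rs hts hfs hfe hrs
    rw [List.append_cons]
    by_cases hc : c = '_'
    · subst hc
      rcases rs with _ | r
      all_goals simp only [scanLoop, reduceIte]
      · -- new run starts at i = p.length
        have hr' : InvRs p (some p.length) ∨ (p.length = p.length ∧ InvRs p none) :=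
          Or.inr ⟨rfl, hrs⟩
        have h1 := stepU_ts p ts p.length hts hr'
        have h2 := stepU_fs p fs hfs
        have h3 := stepU_fe p fs fe hfe
        have h4 := stepU_rs p p.length hr'
        have := ih (p ++ ['_'])
          (if ts = none ∧ p.length + 3 ≤ p.length + 1 then some p.length else ts)
          (if fs = none then some p.length else fs) fe (some p.length) h1 h2 h3 h4
        simpa [List.length_append] using this
      · have hr' : InvRs p (some r) ∨ (r = p.length ∧ InvRs p none) := Or.inl hrs
        have h1 := stepU_ts p ts r hts hr'
        have h2 := stepU_fs p fs hfs
        have h3 := stepU_fe p fs fe hfe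
        have h4 := stepU_rs p r hr'
        have := ih (p ++ ['_'])
          (if ts = none ∧ r + 3 ≤ p.length + 1 then some r else ts)
          (if fs = none then some p.length else fs) fe (some r) h1 h2 h3 h4
        simpa [List.length_append] using this
    · simp only [scanLoop, if_neg hc]
      have h1 := stepN_ts p c hc ts hts
      have h2 := stepN_fs p c hc fs hfs
      have h3 := stepN_fe p c hc fs fe hfs hfe
      have h4 := stepN_rs p c hc
      have := ih (p ++ [c]) ts fs
        (if fs ≠ none ∧ fe = none then some p.length else fe) none h1 h2 h3 h4
      simpa [List.length_append] using this

lemma prefix3_iff (s : List Char) (j : Nat) : ['_', '_', '_'] <+: s.drop j ↔ P3 s j := by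
  unfold P3
  have h : ∀ (l : List Char), ['_', '_', '_'] <+: l ↔
      l[0]? = some '_' ∧ l[1]? = some '_' ∧ l[2]? = some '_' := by
    intro l
    rcases l with _ | ⟨x, _ | ⟨y, _ | ⟨z, t⟩⟩⟩ <;> simp [List.cons_prefix_iff]
  rw [h, List.getElem?_drop, List.getElem?_drop, List.getElem?_drop]
  norm_num

lemma prefix1_iff (s : List Char) (j : Nat) : ['_'] <+: s.drop j ↔ P1 s j := by
  unfold P1
  have h : ∀ (l : List Char), ['_'] <+: l ↔ l[0]? = some '_' := by
    intro l
    rcases l with _ | ⟨x, t⟩ <;> simp [List.cons_prefix_iff]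
  rw [h, List.getElem?_drop]
  norm_num

lemma find_eq_of (s sub : List Char) (t : Nat)
    (h1 : sub <+: s.drop t) (h2 : ∀ j < t, ¬ sub <+: s.drop j) :
    PySem.Chars.find s sub = (t : Int) := by
  have hinf : sub <:+: s := by
    rw [← PySem.Chars.isIn_iff_infix, ← PySem.Chars.exists_prefix_drop_iff_isIn]
    exact ⟨t, h1⟩
  have hpos : 0 ≤ PySem.Chars.find s sub := (PySem.Chars.find_nonneg_iff s sub).mpr hinf
  obtain ⟨hp, hmin⟩ := PySem.Chars.find_spec hpos
  have heq : (PySem.Chars.find s sub).toNat = t := by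
    rcases lt_trichotomy (PySem.Chars.find s sub).toNat t with h | h | h
    · exact absurd hp (h2 _ h)
    · exact h
    · exact absurd h1 (hmin t h)
  omega

lemma pyWhileEnd_eq (s : List Char) (f e : Nat) (hfe : f ≤ e)
    (hrun : ∀ j, f ≤ j → j < e → s[j]? = some '_')
    (hend : e = s.length ∨ ∃ d, s[e]? = some d ∧ d ≠ '_') :
    pyWhileEnd s f = e := by
  rw [pyWhileEnd]
  by_cases hlt : f < e
  · have hf : s[f]? = some '_' := hrun f le_rfl hlt
    have hflen : f < s.length := lt_len hf
    rw [if_pos ⟨hflen, by rw [PySem.List.pyGet?_natCast s f]; exact hf⟩]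
    exact pyWhileEnd_eq s (f + 1) e hlt (fun j hj hjl => hrun j (by omega) hjl) hend
  · have heq : f = e := by omega
    subst heq
    rw [if_neg ?_]
    rintro ⟨hlen, hget⟩
    rw [PySem.List.pyGet?_natCast s f] at hget
    rcases hend with h | ⟨d, hd, hdne⟩
    · omega
    · rw [hd] at hget
      exact hdne (Option.some.inj hget)
termination_by e - f

-- ===== VERDICT (by name: the statement is the Claim_ definition above) =====
theorem find_blank_py_spec : Claim_equal_find_blank_py := by
  unfold Claim_equal_find_blank_py
  intro sentence _
  unfold Spec_find_blank_py
  have hmain := scan_correct sentence.toList [] none none none none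
    (by intro j h; exact absurd h.1 (by simp))
    (by intro j h; exact absurd h (by simp [P1]))
    trivial
    (by simp [InvRs])
  simp only [List.nil_append, List.length_nil] at hmain
  rcases hscan : scanLoop sentence.toList 0 none none none none with ⟨ts, fs, fe⟩
  rw [hscan] at hmain
  obtain ⟨hts, hfs, hfe⟩ := hmain
  have h3l : "___".toList = ['_', '_', '_'] := by decide
  have h1l : "_".toList = ['_'] := by decide
  unfold find_blank_py find_blank_py_alt
  rcases ts with _ | t
  · have hno3 : PySem.Chars.isIn "___".toList sentence.toList = false := by
      rw [PySem.Chars.isIn_eq_false_iff]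
      intro hinf
      obtain ⟨j, hj⟩ := (PySem.Chars.exists_prefix_drop_iff_isIn _ _).mpr
        ((PySem.Chars.isIn_iff_infix _ _).mpr hinf)
      rw [h3l, prefix3_iff] at hj
      exact hts j hj
    rcases fs with _ | f
    · have hno1 : PySem.Chars.isIn "_".toList sentence.toList = false := by
        rw [PySem.Chars.isIn_eq_false_iff]
        intro hinf
        obtain ⟨j, hj⟩ := (PySem.Chars.exists_prefix_drop_iff_isIn _ _).mpr
          ((PySem.Chars.isIn_iff_infix _ _).mpr hinf)
        rw [h1l, prefix1_iff] at hj
        exact hfs j hj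
      simp only [PySem.Str.isIn_eq, hno3, hno1, hscan]
      simp
    · have hone : PySem.Chars.isIn "_".toList sentence.toList = true :=
        (PySem.Chars.exists_prefix_drop_iff_isIn _ _).mp
          ⟨f, by rw [h1l, prefix1_iff]; exact hfs.1⟩
      have hfind : PySem.Chars.find sentence.toList "_".toList = (f : Int) := by
        rw [h1l]
        exact find_eq_of _ _ f ((prefix1_iff _ _).mpr hfs.1)
          (fun j hj hp => hfs.2 j hj ((prefix1_iff _ _).mp hp))
      have hwhile : pyWhileEnd sentence.toList f =
          (match fe with | some e => e | none => sentence.toList.length) := by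
        rcases fe with _ | e
        · exact pyWhileEnd_eq _ f _ (le_of_lt (lt_len hfs.1)) hfe (Or.inl rfl)
        · obtain ⟨hflt, hrun, d, hd, hdne⟩ := hfe
          exact pyWhileEnd_eq _ f e (le_of_lt hflt) hrun (Or.inr ⟨d, hd, hdne⟩)
      simp only [PySem.Str.isIn_eq, hno3, hone, PySem.Str.find_eq, hfind, hscan,
        Bool.false_eq_true, if_false, if_true, Int.toNat_natCast, hwhile]
      rcases fe with _ | e <;> rfl
  · have hyes3 : PySem.Chars.isIn "___".toList sentence.toList = true :=
      (PySem.Chars.exists_prefix_drop_iff_isIn _ _).mp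
        ⟨t, by rw [h3l, prefix3_iff]; exact hts.1⟩
    have hfind : PySem.Chars.find sentence.toList "___".toList = (t : Int) := by
      rw [h3l]
      exact find_eq_of _ _ t ((prefix3_iff _ _).mpr hts.1)
        (fun j hj hp => hts.2 j hj ((prefix3_iff _ _).mp hp))
    simp only [PySem.Str.isIn_eq, hyes3, PySem.Str.find_eq, hfind, hscan, if_true]
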